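-- pv_equiv track=rewrite | github.com/Eric-Kosovec/DougBot-legacy | dougbot/core/bot.py | _same_extension_package
-- ===== SOURCE A (Python) =====
-- def _same_extension_package(main_module: str, sibling_module: str):
--     extension_package = 'dougbot.extension'
--     i = 0
--     if main_module.startswith(extension_package):
--         i = len(extension_package) + 1
--
--     j = 0
--     if sibling_module.startswith(extension_package):
--         j = len(extension_package) + 1
--
--     while i < len(main_module) and j < len(sibling_module):
--         if main_module[i] != sibling_module[j]:
--             return False
--         if main_module[i] == sibling_module[j] == '.':
--             return True
--         i += 1
--         j += 1
--
--     return False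
-- ===== SOURCE B (Python) =====
-- def _same_extension_package(main_module: str, sibling_module: str):
--     ext = 'dougbot.extension'
--     m = main_module[len(ext) + 1:] if main_module.startswith(ext) else main_module
--     s = sibling_module[len(ext) + 1:] if sibling_module.startswith(ext) else sibling_module
--     m_parts = m.split('.')
--     s_parts = s.split('.')
--     if len(m_parts) < 2 or len(s_parts) < 2:
--         return False
--     return m_parts[0] == s_parts[0]
-- ===== Notes on version B (the rewrite author's own statement) =====
-- stated objective: idiomatic
-- what changed: Replaces the char-by-char twin-index while loop with prefix stripping via a slice, splitting each string into dot-separated segments, and comparing the first segments (requiring a '.' to exist in both).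
import Mathlib
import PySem

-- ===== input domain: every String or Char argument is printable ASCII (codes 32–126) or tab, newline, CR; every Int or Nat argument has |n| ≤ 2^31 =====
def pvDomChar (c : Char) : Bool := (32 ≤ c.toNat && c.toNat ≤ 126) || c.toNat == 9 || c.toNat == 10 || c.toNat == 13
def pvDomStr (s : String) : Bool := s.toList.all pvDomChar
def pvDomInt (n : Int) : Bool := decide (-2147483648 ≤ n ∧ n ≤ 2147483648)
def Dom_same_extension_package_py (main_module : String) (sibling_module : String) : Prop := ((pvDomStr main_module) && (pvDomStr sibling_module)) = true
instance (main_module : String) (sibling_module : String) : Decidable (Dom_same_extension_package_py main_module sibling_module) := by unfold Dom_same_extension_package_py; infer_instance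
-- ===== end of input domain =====

-- B replaces A's char-by-char twin-index scan with strip-prefix + split('.') + compare first segments (idiomatic; return value only, no side effects).

-- ===== PORT A =====
-- the while loop of A, with its two indices
def pyALoopA (m s : List Char) (i j : Nat) : Bool :=
  if hm : i < m.length then
    if hs : j < s.length then
      if m[i] != s[j] then false
      else if m[i] == '.' && s[j] == '.' then true
      else pyALoopA m s (i + 1) (j + 1)
    else false
  else false
termination_by m.length - i

def same_extension_package_py (main_module : String) (sibling_module : String) : Bool :=
  let extension_package := "dougbot.extension"
  let i : Nat := if PySem.Str.startswith main_module extension_package then extension_package.toList.length + 1 else 0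
  let j : Nat := if PySem.Str.startswith sibling_module extension_package then extension_package.toList.length + 1 else 0
  pyALoopA main_module.toList sibling_module.toList i j

-- ===== PORT B =====
-- m[len(ext)+1:] if m.startswith(ext) else m
def stripExtB (x : List Char) : List Char :=
  if PySem.Chars.startswith x "dougbot.extension".toList then
    PySem.List.slice x (some (("dougbot.extension".toList.length + 1 : Nat) : Int)) none
  else x

-- .split('.') ported as List.splitOn '.' (identical for a one-character separator)
def same_extension_package_py_alt (main_module : String) (sibling_module : String) : Bool :=
  let m_parts := (stripExtB main_module.toList).splitOn '.'
  let s_parts := (stripExtB sibling_module.toList).splitOn '.'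
  if m_parts.length < 2 || s_parts.length < 2 then false
  else m_parts.headD [] == s_parts.headD []

-- ===== PRECONDITION & SPEC =====
def Spec_same_extension_package_py (main_module : String) (sibling_module : String) (out : Bool) : Prop := out = same_extension_package_py_alt main_module sibling_module
instance (main_module : String) (sibling_module : String) (out : Bool) : Decidable (Spec_same_extension_package_py main_module sibling_module out) := by unfold Spec_same_extension_package_py; infer_instance

-- ===== CLAIM (what is proved, stated in full; the proofs are below) =====
def Claim_equal_same_extension_package_py : Prop := ∀ (main_module : String) (sibling_module : String), Dom_same_extension_package_py main_module sibling_module → Spec_same_extension_package_py main_module sibling_module (same_extension_package_py main_module sibling_module)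

-- ===== LEMMAS AND PROOFS =====

-- A's loop, restated structurally on the suffixes it scans
def cmpDot : List Char → List Char → Bool
  | a :: as, b :: bs =>
      if a != b then false
      else if a == '.' && b == '.' then true
      else cmpDot as bs
  | _, _ => false

theorem pyALoopA_eq_cmpDot (m s : List Char) (i j : Nat) :
    pyALoopA m s i j = cmpDot (m.drop i) (s.drop j) := by
  by_cases hm : i < m.length
  · by_cases hs : j < s.length
    · rw [pyALoopA, dif_pos hm, dif_pos hs,
        List.drop_eq_getElem_cons hm, List.drop_eq_getElem_cons hs, cmpDot]
      split
      · rfl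
      · split
        · rfl
        · exact pyALoopA_eq_cmpDot m s (i + 1) (j + 1)
    · rw [pyALoopA, dif_pos hm, dif_neg hs,
        List.drop_of_length_le (show s.length ≤ j by omega)]
      cases m.drop i <;> rfl
  · rw [pyALoopA, dif_neg hm, List.drop_of_length_le (by omega)]
    cases s.drop j <;> rfl
termination_by m.length - i

theorem cmpDot_char (xs ys : List Char) :
    cmpDot xs ys =
      (decide ('.' ∈ xs) && decide ('.' ∈ ys)
        && (xs.takeWhile (· != '.') == ys.takeWhile (· != '.'))) := by
  induction xs generalizing ys with
  | nil => cases ys <;> simp [cmpDot]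
  | cons a as ih =>
    cases ys with
    | nil => simp [cmpDot]
    | cons b bs =>
      rw [cmpDot]
      by_cases hab : a = b
      · subst hab
        by_cases hd : a = '.'
        · subst hd; simp
        · simp [hd, Ne.symm hd, ih bs]
      · have hb : (a != b) = true := by simp [hab]
        rw [if_pos hb]
        by_cases hd : a = '.'
        · subst hd
          have hbd : b ≠ '.' := fun h => hab h.symm
          simp [hbd]
        · by_cases hbd : b = '.'
          · subst hbd
            simp [Ne.symm hd]
            exact fun _ => hd
          · have ha : (a != '.') = true := by simp [hd]
            simp [ha, hab, Ne.symm hd, Ne.symm hbd, hbd]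

-- cs.splitOn '.' = first segment :: rest, rest empty iff no '.'
theorem splitOn_dot_shape (cs : List Char) :
    ∃ t, cs.splitOn '.' = cs.takeWhile (· != '.') :: t ∧ (t = [] ↔ '.' ∉ cs) := by
  induction cs with
  | nil => exact ⟨[], by simp [List.splitOn, List.splitOnP_nil], by simp⟩
  | cons c cs ih =>
    obtain ⟨t, ht, hmem⟩ := ih
    by_cases hc : c = '.'
    · subst hc
      refine ⟨cs.splitOn '.', ?_, ?_⟩
      · simp [List.splitOn, List.splitOnP_cons, List.takeWhile]
      · constructor
        · intro h; exact absurd h (by simpa [List.splitOn] using List.splitOnP_ne_nil _ cs)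
        · intro h; exact absurd (by simp : '.' ∈ '.' :: cs) h
    · refine ⟨t, ?_, ?_⟩
      · simp only [List.splitOn, List.splitOnP_cons] at ht ⊢
        rw [if_neg (by simp [hc]), ht, List.modifyHead_cons,
          List.takeWhile_cons, if_pos (by simp [hc])]
      · rw [hmem]; simp [Ne.symm hc]

theorem cmpDot_eq_alt_core (xs ys : List Char) :
    cmpDot xs ys =
      (if (xs.splitOn '.').length < 2 || (ys.splitOn '.').length < 2 then false
       else (xs.splitOn '.').headD [] == (ys.splitOn '.').headD []) := by
  obtain ⟨t, ht, hmt⟩ := splitOn_dot_shape xs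
  obtain ⟨u, hu, hmu⟩ := splitOn_dot_shape ys
  rw [cmpDot_char, ht, hu]
  by_cases hx : '.' ∈ xs
  · by_cases hy : '.' ∈ ys
    · have htn : t ≠ [] := fun h => (hmt.mp h) hx
      have hun : u ≠ [] := fun h => (hmu.mp h) hy
      simp [hx, hy, htn, hun]
    · have : u = [] := hmu.mpr hy
      subst this
      simp [hy]
  · have : t = [] := hmt.mpr hx
    subst this
    simp [hx]

-- the two strip computations coincide
theorem stripExtB_eq (x : List Char) :
    stripExtB x =
      x.drop (if PySem.Chars.startswith x "dougbot.extension".toList then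
        "dougbot.extension".toList.length + 1 else 0) := by
  unfold stripExtB
  by_cases h : PySem.Chars.startswith x "dougbot.extension".toList = true
  · rw [if_pos h, if_pos h, PySem.List.slice_from_natCast]
  · rw [if_neg h, if_neg h, List.drop_zero]

-- ===== VERDICT (by name: the statement is the Claim_ definition above) =====
theorem same_extension_package_py_spec : Claim_equal_same_extension_package_py := by
  intro main_module sibling_module _
  show same_extension_package_py main_module sibling_module
      = same_extension_package_py_alt main_module sibling_module
  unfold same_extension_package_py same_extension_package_py_alt
  rw [pyALoopA_eq_cmpDot, cmpDot_eq_alt_core, stripExtB_eq, stripExtB_eq]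
  simp
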